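-- pv_equiv track=rewrite | github.com/MrBrantCode/unitest_baseline | mut_generate/mist_train_cf/cf_24395/solution.py | has_prime
-- ===== SOURCE A (Python) =====
-- def has_prime(numbers):
--     """
--     Checks if at least one number in the list is a prime number.
--
--     Args:
--     numbers (list): A list of integers.
--
--     Returns:
--     bool: True if at least one number in the list is prime, False otherwise.
--     """
--
--     def is_prime(n):
--         """Checks if a number is prime."""
--         if n < 2:
--             return False
--         for i in range(2, int(n**0.5) + 1):
--             if n % i == 0:
--                 return False
--         return True
--
--     for num in numbers:
--         if is_prime(num):
--             return True
--     return False
-- ===== SOURCE B (Python) =====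
-- def has_prime(numbers):
--     """
--     Checks if at least one number in the list is a prime number.
--     """
--     candidates = [n for n in numbers if n >= 2]
--     if not candidates:
--         return False
--     limit = int(max(candidates) ** 0.5)
--     primes = []
--     for p in range(2, limit + 1):
--         if all(p % f for f in primes if f * f <= p):
--             primes.append(p)
--     for n in candidates:
--         if all(n % f for f in primes if f * f <= n):
--             return True
--     return False
-- ===== Notes on version B (the rewrite author's own statement) =====
-- stated objective: alternative
-- what changed: Instead of trial-dividing every number by all integers up to sqrt(n), B builds one shared list of the primes up to sqrt(max candidate) (each new p tested only against the primes found so far) and then tests each candidate >= 2 by dividing only by those primes.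
import Mathlib
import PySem

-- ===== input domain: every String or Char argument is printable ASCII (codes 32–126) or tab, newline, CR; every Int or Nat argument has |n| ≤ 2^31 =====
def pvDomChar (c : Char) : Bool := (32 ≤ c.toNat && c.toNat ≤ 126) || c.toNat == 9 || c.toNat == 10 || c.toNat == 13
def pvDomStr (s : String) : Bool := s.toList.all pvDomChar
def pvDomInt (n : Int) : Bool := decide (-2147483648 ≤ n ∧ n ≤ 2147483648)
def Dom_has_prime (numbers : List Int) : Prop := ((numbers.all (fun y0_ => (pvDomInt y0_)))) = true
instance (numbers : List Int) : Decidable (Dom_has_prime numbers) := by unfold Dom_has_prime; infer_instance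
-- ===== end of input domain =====

-- B replaces A's per-number trial division by ALL integers up to √n with one shared,
-- incrementally built table of the primes up to √(max candidate), then tests each
-- candidate by dividing only by those primes (alternative algorithm; return value only).

-- ===== PORT A =====
-- int(n**0.5) is ported as Int.sqrt: exact for 0 ≤ n ≤ 2^31 (CPython's float sqrt
-- floors correctly in that range), and the branch guards n ≥ 2.
def is_prime (n : Int) : Bool :=
  if n < 2 then false
  else (PySem.List.pyRange 2 (Int.sqrt n + 1) 1).all (fun i => !(PySem.Int.mod n i == 0))

def has_prime (numbers : List Int) : Bool := numbers.any is_prime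

-- ===== PORT B =====
-- one iteration of Source B's prime-building loop body
def primeStep (primes : List Int) (p : Int) : List Int :=
  if (primes.filter (fun f => decide (f * f ≤ p))).all (fun f => !(PySem.Int.mod p f == 0)) then
    primes ++ [p]
  else primes

-- the 'for p in range(2, limit + 1)' loop of Source B
def buildPrimes (limit : Int) : List Int :=
  (PySem.List.pyRange 2 (limit + 1) 1).foldl primeStep []

-- int(max(candidates) ** 0.5) ported as Int.sqrt (same exactness note as in port A)
def has_prime_alt (numbers : List Int) : Bool :=
  let candidates := numbers.filter (fun n => decide (2 ≤ n))
  match PySem.List.max? candidates (fun x => x) with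
  | none => false
  | some big =>
    let primes := buildPrimes (Int.sqrt big)
    candidates.any (fun n =>
      (primes.filter (fun f => decide (f * f ≤ n))).all (fun f => !(PySem.Int.mod n f == 0)))

-- ===== PRECONDITION & SPEC =====
def Spec_has_prime (numbers : List Int) (out : Bool) : Prop := out = has_prime_alt numbers
instance (numbers : List Int) (out : Bool) : Decidable (Spec_has_prime numbers out) := by unfold Spec_has_prime; infer_instance

-- ===== CLAIM (what is proved, stated in full; the proofs are below) =====
def Claim_equal_has_prime : Prop := ∀ (numbers : List Int), Dom_has_prime numbers → Spec_has_prime numbers (has_prime numbers)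

-- ===== LEMMAS AND PROOFS =====

-- Dividing n by the members of a list that is sound (contains only primes ≥ 2) and
-- complete (contains every prime f with f*f ≤ n) decides primality of n.
lemma test_eq (primes : List Int) (n : Int) (hn : 2 ≤ n)
    (hsound : ∀ f ∈ primes, Nat.Prime f.toNat ∧ 2 ≤ f)
    (hcomp : ∀ f : Int, Nat.Prime f.toNat → 2 ≤ f → f * f ≤ n → f ∈ primes) :
    ((primes.filter (fun f => decide (f * f ≤ n))).all (fun f => !(PySem.Int.mod n f == 0)))
      = decide (Nat.Prime n.toNat) := by
  rw [Bool.eq_iff_iff]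
  simp only [List.all_eq_true, List.mem_filter, decide_eq_true_eq, Bool.not_eq_true',
    beq_eq_false_iff_ne, ne_eq, decide_eq_true_eq]
  have hn0 : (0 : Int) ≤ n := by omega
  have hcast : ((n.toNat : Int)) = n := Int.toNat_of_nonneg hn0
  constructor
  · intro h
    by_contra hnp
    have h2 : 2 ≤ n.toNat := by omega
    have hm := Nat.minFac_prime (n := n.toNat) (by omega)
    have hmd := Nat.minFac_dvd n.toNat
    have hmsq : n.toNat.minFac ^ 2 ≤ n.toNat := Nat.minFac_sq_le_self (by omega) hnp
    set m := n.toNat.minFac with hmdef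
    have hm2 : 2 ≤ m := hm.two_le
    have hfin : (m : Int) ∈ primes := by
      apply hcomp
      · simpa using hm
      · exact_mod_cast hm2
      · have : (m : Int) * m ≤ (n.toNat : Int) := by
          exact_mod_cast (by nlinarith [hmsq] : m * m ≤ n.toNat)
        omega
    have := h (m : Int) ⟨hfin, by
      have : (m : Int) * m ≤ (n.toNat : Int) := by
        exact_mod_cast (by nlinarith [hmsq] : m * m ≤ n.toNat)
      omega⟩
    rw [PySem.Int.mod_eq_zero_iff_dvd] at this
    exact this (by rw [← hcast]; exact_mod_cast hmd)
  · rintro hp f ⟨hf, hfn⟩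
    rw [PySem.Int.mod_eq_zero_iff_dvd]
    intro hdvd
    obtain ⟨hfp, hf2⟩ := hsound f hf
    have hf0 : (0 : Int) ≤ f := by omega
    have hdn : f.toNat ∣ n.toNat := by
      rwa [← Int.toNat_of_nonneg hf0, ← hcast, Int.natCast_dvd_natCast] at hdvd
    have heq : f.toNat = n.toNat := (Nat.prime_dvd_prime_iff_eq hfp hp).mp hdn
    have : f = n := by omega
    nlinarith [hfn, hf2]

-- Invariant of Source B's prime-building loop: after processing range(2, 2+k) the
-- accumulator holds exactly the primes below 2+k (sound and complete).
lemma buildPrimes_inv_aux (k : Nat) :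
    (∀ f ∈ (PySem.List.pyRange 2 (2 + (k : Int)) 1).foldl primeStep [],
        Nat.Prime f.toNat ∧ 2 ≤ f ∧ f < 2 + (k : Int)) ∧
    (∀ f : Int, Nat.Prime f.toNat → 2 ≤ f → f < 2 + (k : Int) →
        f ∈ (PySem.List.pyRange 2 (2 + (k : Int)) 1).foldl primeStep []) := by
  induction k with
  | zero =>
    rw [show ((2 : Int) + (0 : Nat)) = 2 by norm_num, PySem.List.pyRange_one_eq_nil le_rfl]
    exact ⟨by simp, fun f _ h2 hlt => by omega⟩
  | succ k ih =>
    set b : Int := 2 + (k : Int) with hb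
    have hsplit : PySem.List.pyRange 2 (2 + ((k + 1 : Nat) : Int)) 1
        = PySem.List.pyRange 2 b 1 ++ [b] := by
      have : (2 + ((k + 1 : Nat) : Int)) = b + 1 := by push_cast; ring
      rw [this, PySem.List.pyRange_one_succ_right (by omega)]
    have hb1 : (2 + ((k + 1 : Nat) : Int)) = b + 1 := by push_cast; ring
    obtain ⟨ihS, ihC⟩ := ih
    set L : List Int := (PySem.List.pyRange 2 b 1).foldl primeStep [] with hL
    have htest : ((L.filter (fun f => decide (f * f ≤ b))).all
        (fun f => !(PySem.Int.mod b f == 0))) = decide (Nat.Prime b.toNat) := by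
      apply test_eq L b (by omega)
      · intro f hf; exact ⟨(ihS f hf).1, (ihS f hf).2.1⟩
      · intro f hfp hf2 hfb
        exact ihC f hfp hf2 (by nlinarith)
    rw [hsplit, List.foldl_append]
    simp only [List.foldl_cons, List.foldl_nil]
    rw [show primeStep L b = if Nat.Prime b.toNat then L ++ [b] else L by
      rw [primeStep, htest]; simp only [decide_eq_true_eq]]
    split_ifs with hbp
    · constructor
      · intro f hf
        rcases List.mem_append.mp hf with hf | hf
        · obtain ⟨h1, h2, h3⟩ := ihS f hf; exact ⟨h1, h2, by omega⟩
        · rw [List.mem_singleton.mp hf]; exact ⟨hbp, by omega, by omega⟩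
      · intro f hfp hf2 hlt
        rw [hb1] at hlt
        by_cases hfb : f = b
        · exact List.mem_append.mpr (Or.inr (by simp [hfb]))
        · exact List.mem_append.mpr (Or.inl (ihC f hfp hf2 (by omega)))
    · constructor
      · intro f hf; obtain ⟨h1, h2, h3⟩ := ihS f hf; exact ⟨h1, h2, by omega⟩
      · intro f hfp hf2 hlt
        rw [hb1] at hlt
        have hfb : f ≠ b := by rintro rfl; exact hbp hfp
        exact ihC f hfp hf2 (by omega)

-- buildPrimes limit is sound and complete for the primes up to limit.
lemma buildPrimes_inv (limit : Int) :
    (∀ f ∈ buildPrimes limit, Nat.Prime f.toNat ∧ 2 ≤ f) ∧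
    (∀ f : Int, Nat.Prime f.toNat → 2 ≤ f → f ≤ limit → f ∈ buildPrimes limit) := by
  by_cases h : limit ≤ 0
  · rw [buildPrimes, PySem.List.pyRange_one_eq_nil (by omega)]
    exact ⟨by simp, fun f _ h2 hle => by omega⟩
  · have hk : limit + 1 = 2 + ((limit - 1).toNat : Int) := by omega
    have := buildPrimes_inv_aux (limit - 1).toNat
    rw [← hk] at this
    rw [buildPrimes]
    exact ⟨fun f hf => ⟨(this.1 f hf).1, (this.1 f hf).2.1⟩,
      fun f hfp hf2 hle => this.2 f hfp hf2 (by omega)⟩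

-- A's is_prime decides "n ≥ 2 and n.toNat is prime".
lemma is_prime_eq (n : Int) : is_prime n = (decide (2 ≤ n) && decide (Nat.Prime n.toNat)) := by
  rw [is_prime]
  split_ifs with h
  · have : ¬ (2 ≤ n) := by omega
    simp [this]
  · have h2 : 2 ≤ n := by omega
    have hsq : Int.sqrt n = ((Nat.sqrt n.toNat : Nat) : Int) := by simp [Int.sqrt]
    rw [Bool.eq_iff_iff]
    simp only [List.all_eq_true, PySem.List.mem_pyRange_one, Bool.not_eq_true',
      beq_eq_false_iff_ne, ne_eq, Bool.and_eq_true, decide_eq_true_eq, h2, true_and]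
    have hcast : ((n.toNat : Int)) = n := Int.toNat_of_nonneg (by omega)
    constructor
    · intro h'
      rw [Nat.prime_def_le_sqrt]
      refine ⟨by omega, ?_⟩
      intro m hm2 hms hdvd
      have hmlt : (m : Int) < Int.sqrt n + 1 := by rw [hsq]; exact_mod_cast Nat.lt_succ_of_le hms
      have := h' (m : Int) ⟨by exact_mod_cast hm2, hmlt⟩
      rw [PySem.Int.mod_eq_zero_iff_dvd] at this
      exact this (by rw [← hcast]; exact_mod_cast hdvd)
    · intro hp i ⟨hi2, hilt⟩
      rw [PySem.Int.mod_eq_zero_iff_dvd]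
      intro hdvd
      have hi0 : (0 : Int) ≤ i := by omega
      have his : i.toNat ≤ Nat.sqrt n.toNat := by
        rw [hsq] at hilt; omega
      have hdn : i.toNat ∣ n.toNat := by
        rwa [← Int.toNat_of_nonneg hi0, ← hcast, Int.natCast_dvd_natCast] at hdvd
      exact (Nat.prime_def_le_sqrt.mp hp).2 i.toNat (by omega) his hdn

-- ===== VERDICT (by name: the statement is the Claim_ definition above) =====
theorem has_prime_spec : Claim_equal_has_prime := by
  intro numbers _
  unfold Spec_has_prime
  rw [has_prime, has_prime_alt]
  simp only []
  set candidates : List Int := numbers.filter (fun n => decide (2 ≤ n)) with hcand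
  have hA : numbers.any is_prime
      = numbers.any (fun n => decide (2 ≤ n) && decide (Nat.Prime n.toNat)) :=
    PySem.List.any_congr_mem (fun n _ => is_prime_eq n)
  rcases hmax : PySem.List.max? candidates (fun x => x) with _ | big
  · have hnil : candidates = [] := (PySem.List.max?_eq_none_iff candidates (fun x => x)).mp hmax
    rw [hA, ← List.any_filter, ← hcand, hnil]
    simp
  · have hbigmem : big ∈ candidates := PySem.List.max?_mem hmax
    have hbig2 : 2 ≤ big := by
      have := List.mem_filter.mp (hcand ▸ hbigmem)
      simpa using this.2
    have hle : ∀ y ∈ candidates, y ≤ big := PySem.List.max?_isMax hmax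
    obtain ⟨hS, hC⟩ := buildPrimes_inv (Int.sqrt big)
    have hB : candidates.any (fun n =>
        ((buildPrimes (Int.sqrt big)).filter (fun f => decide (f * f ≤ n))).all
          (fun f => !(PySem.Int.mod n f == 0)))
        = candidates.any (fun n => decide (Nat.Prime n.toNat)) := by
      apply PySem.List.any_congr_mem
      intro n hn
      have hn2 : 2 ≤ n := by
        have := List.mem_filter.mp (hcand ▸ hn)
        simpa using this.2
      have hnb : n ≤ big := hle n hn
      apply test_eq _ n hn2 hS
      intro f hfp hf2 hfn
      apply hC f hfp hf2
      have hsq : Int.sqrt big = ((Nat.sqrt big.toNat : Nat) : Int) := by simp [Int.sqrt]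
      have hfs : f.toNat ≤ Nat.sqrt n.toNat := by
        apply Nat.le_sqrt.mpr
        have : (f.toNat : Int) * (f.toNat : Int) ≤ ((n.toNat : Int)) := by
          rw [Int.toNat_of_nonneg (by omega : (0:Int) ≤ f), Int.toNat_of_nonneg (by omega : (0:Int) ≤ n)]
          exact hfn
        exact_mod_cast this
      have hmono : Nat.sqrt n.toNat ≤ Nat.sqrt big.toNat := Nat.sqrt_le_sqrt (by omega)
      rw [hsq]; omega
    rw [hA, ← List.any_filter, ← hcand]
    exact hB.symm
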